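-- pv_equiv track=rewrite | github.com/zkytony/relations-pomdp | relpomdp/home2d/learning/compute_difficulty.py | process_detections_pomdp
-- ===== SOURCE A (Python) =====
-- def process_detections_pomdp(detections):
--     """Detections is created by running a pomdp solver"""
--     class_detections = {}
--     for envid in detections:
--         done_classes = set()
--         for detected_class, objid, step in detections[envid]:
--             if detected_class in done_classes:
--                 continue
--             if detected_class not in class_detections:
--                 class_detections[detected_class] = []
--             class_detections[detected_class].append(step)
--             done_classes.add(detected_class)
--     return class_detections
-- ===== SOURCE B (Python) =====
-- def process_detections_pomdp(detections):
--     """Detections is created by running a pomdp solver"""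
--     # pass 1: global list of classes in order of first appearance
--     order = []
--     seen = set()
--     for envid in detections:
--         for c, _objid, _step in detections[envid]:
--             if c not in seen:
--                 seen.add(c)
--                 order.append(c)
--     # pass 2: for each class, gather its first detection step in every env
--     result = {}
--     for c in order:
--         steps = []
--         for envid in detections:
--             for dc, _objid, s in detections[envid]:
--                 if dc == c:
--                     steps.append(s)
--                     break
--         result[c] = steps
--     return result
-- ===== Notes on version B (the rewrite author's own statement) =====
-- stated objective: alternative
-- what changed: B inverts the loop structure: instead of A's single accumulating pass over all detections guarded by a per-env seen-set, B first computes the global first-appearance order of classes in one pass, then for each class separately scans every environment for its first detection (with break) and assembles the dict class by class.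
import Mathlib
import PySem

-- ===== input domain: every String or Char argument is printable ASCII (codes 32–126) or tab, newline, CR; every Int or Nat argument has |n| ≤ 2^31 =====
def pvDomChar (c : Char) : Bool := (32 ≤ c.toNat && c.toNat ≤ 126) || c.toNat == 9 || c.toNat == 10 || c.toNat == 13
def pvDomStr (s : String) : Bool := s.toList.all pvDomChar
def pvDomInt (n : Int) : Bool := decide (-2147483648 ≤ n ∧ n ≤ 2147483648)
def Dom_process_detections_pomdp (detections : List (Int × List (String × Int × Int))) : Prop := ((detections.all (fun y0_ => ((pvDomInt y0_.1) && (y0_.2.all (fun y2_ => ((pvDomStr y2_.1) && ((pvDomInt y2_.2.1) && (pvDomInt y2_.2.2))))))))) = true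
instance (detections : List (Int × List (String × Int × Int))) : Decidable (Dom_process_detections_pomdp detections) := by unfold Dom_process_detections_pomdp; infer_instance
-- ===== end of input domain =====

-- B replaces A's single accumulating pass (per-env seen-set + continue, appending into a
-- growing dict) by a class-driven two-phase algorithm: first compute the global class order,
-- then for each class scan every env for its first detection (alternative, not faster).

-- ===== PORT A =====
-- one step of A's inner loop: state = (class_detections, done_classes)
def pdpStepA (st : PySem.Dict String (List Int) × PySem.Set String)
    (det : String × Int × Int) : PySem.Dict String (List Int) × PySem.Set String :=
  if PySem.Set.contains st.2 det.1 then st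
  else
    let cd := if st.1.contains det.1 = false then st.1.insert det.1 [] else st.1
    (cd.modify det.1 [] (fun l => l ++ [det.2.2]), PySem.Set.add st.2 det.1)

def process_detections_pomdp (detections : List (Int × List (String × Int × Int))) : List (String × List Int) :=
  (detections.foldl
    (fun cd env => (env.2.foldl pdpStepA (cd, PySem.Set.empty)).1)
    PySem.Dict.empty).items

-- ===== PORT B =====
-- pass 1 inner step: state = (order, seen); record a class on first global appearance
def pdpOrderStep (os : List String × PySem.Set String)
    (det : String × Int × Int) : List String × PySem.Set String :=
  if PySem.Set.contains os.2 det.1 then os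
  else (os.1 ++ [det.1], PySem.Set.add os.2 det.1)

def pdpOrder (detections : List (Int × List (String × Int × Int))) : List String :=
  (detections.foldl (fun os env => env.2.foldl pdpOrderStep os) ([], PySem.Set.empty)).1

-- inner scan with break: step of the first detection of class c in one env, if any
def pdpFirst? (c : String) : List (String × Int × Int) → Option Int
  | [] => none
  | det :: rest => if det.1 == c then some det.2.2 else pdpFirst? c rest

-- pass 2 inner loops: for class c, gather its first step in every env
def pdpSteps (detections : List (Int × List (String × Int × Int))) (c : String) : List Int :=
  detections.foldl (fun steps env =>
    match pdpFirst? c env.2 with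
    | some s => steps ++ [s]
    | none => steps) []

def process_detections_pomdp_alt (detections : List (Int × List (String × Int × Int))) : List (String × List Int) :=
  ((pdpOrder detections).foldl
    (fun r c => r.insert c (pdpSteps detections c)) PySem.Dict.empty).items

-- ===== PRECONDITION & SPEC =====
def Spec_process_detections_pomdp (detections : List (Int × List (String × Int × Int))) (out : List (String × List Int)) : Prop := out = process_detections_pomdp_alt detections
instance (detections : List (Int × List (String × Int × Int))) (out : List (String × List Int)) : Decidable (Spec_process_detections_pomdp detections out) := by unfold Spec_process_detections_pomdp; infer_instance

-- ===== CLAIM (what is proved, stated in full; the proofs are below) =====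
def Claim_equal_process_detections_pomdp : Prop := ∀ (detections : List (Int × List (String × Int × Int))), Dom_process_detections_pomdp detections → Spec_process_detections_pomdp detections (process_detections_pomdp detections)

-- ===== LEMMAS AND PROOFS =====

-- the singleton-or-empty list contributed by one env for class c
def pdpOpt (c : String) (e : List (String × Int × Int)) : List Int :=
  match pdpFirst? c e with
  | some s => [s]
  | none => []

-- A's accumulated dict after processing the whole env list
def pdpAfold (detections : List (Int × List (String × Int × Int))) : PySem.Dict String (List Int) :=
  detections.foldl (fun cd env => (env.2.foldl pdpStepA (cd, PySem.Set.empty)).1) PySem.Dict.empty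

-- B's pass-1 inner fold keeps its two components equal and computes Set.update
lemma pdp_order_diag (e : List (String × Int × Int)) (l : List String) :
    e.foldl pdpOrderStep (l, l)
      = (PySem.Set.update l (e.map (·.1)), PySem.Set.update l (e.map (·.1))) := by
  induction e generalizing l with
  | nil => simp [PySem.Set.update_nil]
  | cons d t ih =>
    rw [List.map_cons, PySem.Set.update_cons]
    by_cases h : d.1 ∈ l
    · have hc : PySem.Set.contains l d.1 = true := (PySem.Set.contains_iff _ _).2 h
      rw [List.foldl_cons,
        show pdpOrderStep (l, l) d = (l, l) from by simp only [pdpOrderStep, hc, if_true],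
        PySem.Set.add_of_mem h]
      exact ih l
    · have hc : PySem.Set.contains l d.1 = false := by
        cases h2 : PySem.Set.contains l d.1
        · rfl
        · exact absurd ((PySem.Set.contains_iff _ _).1 h2) h
      rw [List.foldl_cons,
        show pdpOrderStep (l, l) d = (l ++ [d.1], l ++ [d.1]) from by
          simp only [pdpOrderStep, hc, Bool.false_eq_true, if_false]
          rw [PySem.Set.add_of_not_mem h],
        PySem.Set.add_of_not_mem h]
      exact ih (l ++ [d.1])

-- B's pass-1 outer fold, written on the order component only
lemma pdp_order_eq (detections : List (Int × List (String × Int × Int))) :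
    pdpOrder detections
      = detections.foldl (fun l env => PySem.Set.update l (env.2.map (·.1))) [] := by
  unfold pdpOrder
  suffices h : ∀ (ds : List (Int × List (String × Int × Int))) (l : List String),
      ds.foldl (fun os env => env.2.foldl pdpOrderStep os) (l, l)
        = (ds.foldl (fun l env => PySem.Set.update l (env.2.map (·.1))) l,
           ds.foldl (fun l env => PySem.Set.update l (env.2.map (·.1))) l) by
    rw [show (([], PySem.Set.empty) : List String × PySem.Set String) = (([], []) : List String × PySem.Set String) from rfl,
      h detections []]
  intro ds
  induction ds with
  | nil => intro l; rfl
  | cons e t ih => intro l; simp only [List.foldl_cons, pdp_order_diag]; exact ih _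

-- A's inner loop: keys become Set.update of the old keys with this env's classes
lemma pdp_env_keys (e : List (String × Int × Int)) (cd : PySem.Dict String (List Int))
    (S : PySem.Set String) (h : ∀ c, PySem.Set.contains S c = true → cd.contains c = true) :
    ((e.foldl pdpStepA (cd, S)).1).keys = PySem.Set.update cd.keys (e.map (·.1)) := by
  induction e generalizing cd S with
  | nil => simp [PySem.Set.update_nil]
  | cons d t ih =>
    rw [List.map_cons, PySem.Set.update_cons]
    by_cases hS : PySem.Set.contains S d.1 = true
    · have hmem : d.1 ∈ cd.keys := (PySem.Dict.contains_iff_mem_keys _ _).1 (h d.1 hS)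
      rw [List.foldl_cons,
        show pdpStepA (cd, S) d = (cd, S) from by simp only [pdpStepA, hS, if_true],
        PySem.Set.add_of_mem hmem]
      exact ih cd S h
    · have hS' : PySem.Set.contains S d.1 = false := by
        cases h2 : PySem.Set.contains S d.1
        · rfl
        · exact absurd h2 hS
      by_cases hc : cd.contains d.1 = true
      · have hmem : d.1 ∈ cd.keys := (PySem.Dict.contains_iff_mem_keys _ _).1 hc
        have hkeys : (cd.modify d.1 [] (fun l => l ++ [d.2.2])).keys = cd.keys := by
          rw [PySem.Dict.keys_modify, PySem.Dict.keys_insert_of_contains _ _ hc]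
        rw [List.foldl_cons,
          show pdpStepA (cd, S) d
            = (cd.modify d.1 [] (fun l => l ++ [d.2.2]), PySem.Set.add S d.1) from by
              simp only [pdpStepA, hS', Bool.false_eq_true, if_false, hc,
                Bool.true_eq_false],
          PySem.Set.add_of_mem hmem, ← hkeys]
        refine ih _ _ ?_
        intro c hcc
        rw [PySem.Dict.contains_modify]
        rcases (PySem.Set.mem_add _ _ _).1 ((PySem.Set.contains_iff _ _).1 hcc) with hcin | rfl
        · simp [h c ((PySem.Set.contains_iff _ _).2 hcin)]
        · simp
      · have hc' : cd.contains d.1 = false := by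
          cases h2 : cd.contains d.1
          · rfl
          · exact absurd h2 hc
        have hnmem : d.1 ∉ cd.keys := fun hm =>
          by rw [(PySem.Dict.contains_iff_mem_keys _ _).2 hm] at hc'; cases hc'
        have hkeys : ((cd.insert d.1 []).modify d.1 [] (fun l => l ++ [d.2.2])).keys
            = cd.keys ++ [d.1] := by
          rw [PySem.Dict.keys_modify, PySem.Dict.insert_insert_self,
            PySem.Dict.keys_insert_of_not_contains _ _ hc']
        rw [List.foldl_cons,
          show pdpStepA (cd, S) d
            = ((cd.insert d.1 []).modify d.1 [] (fun l => l ++ [d.2.2]), PySem.Set.add S d.1)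
            from by simp only [pdpStepA, hS', Bool.false_eq_true, if_false, hc', if_true],
          PySem.Set.add_of_not_mem hnmem, ← hkeys]
        refine ih _ _ ?_
        intro c hcc
        rw [PySem.Dict.contains_modify, PySem.Dict.contains_insert]
        rcases (PySem.Set.mem_add _ _ _).1 ((PySem.Set.contains_iff _ _).1 hcc) with hcin | rfl
        · simp [h c ((PySem.Set.contains_iff _ _).2 hcin)]
        · simp

-- A's inner loop keeps the keys without duplicates
lemma pdp_env_nodup (e : List (String × Int × Int)) (cd : PySem.Dict String (List Int))
    (S : PySem.Set String) (h : cd.keys.Nodup) :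
    ((e.foldl pdpStepA (cd, S)).1).keys.Nodup := by
  induction e generalizing cd S with
  | nil => exact h
  | cons d t ih =>
    rw [List.foldl_cons]
    by_cases hS : PySem.Set.contains S d.1 = true
    · rw [show pdpStepA (cd, S) d = (cd, S) from by simp only [pdpStepA, hS, if_true]]
      exact ih cd S h
    · have hS' : PySem.Set.contains S d.1 = false := by
        cases h2 : PySem.Set.contains S d.1
        · rfl
        · exact absurd h2 hS
      rw [show pdpStepA (cd, S) d
          = ((if cd.contains d.1 = false then cd.insert d.1 [] else cd).modify
              d.1 [] (fun l => l ++ [d.2.2]), PySem.Set.add S d.1) from by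
            simp only [pdpStepA, hS', Bool.false_eq_true, if_false]]
      refine ih _ _ ?_
      have hbase : (if cd.contains d.1 = false then cd.insert d.1 [] else cd).keys.Nodup := by
        by_cases hc : cd.contains d.1 = false
        · rw [if_pos hc]; exact PySem.Dict.nodup_keys_insert _ _ _ h
        · rw [if_neg hc]; exact h
      rw [PySem.Dict.keys_modify]
      exact PySem.Dict.nodup_keys_insert _ _ _ hbase

-- A's inner loop on the value of one class c
lemma pdp_env_getD (e : List (String × Int × Int)) (cd : PySem.Dict String (List Int))
    (S : PySem.Set String) (c : String) :
    ((e.foldl pdpStepA (cd, S)).1).getD c []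
      = cd.getD c [] ++ (if PySem.Set.contains S c = true then [] else pdpOpt c e) := by
  induction e generalizing cd S with
  | nil => cases hS : PySem.Set.contains S c <;> simp [pdpOpt, pdpFirst?]
  | cons d t ih =>
    rw [List.foldl_cons]
    by_cases hS : PySem.Set.contains S d.1 = true
    · rw [show pdpStepA (cd, S) d = (cd, S) from by simp only [pdpStepA, hS, if_true], ih cd S]
      by_cases hc : PySem.Set.contains S c = true
      · rw [hc]; simp
      · have hcf : PySem.Set.contains S c = false := by
          cases h2 : PySem.Set.contains S c
          · rfl
          · exact absurd h2 hc
        have hne : (d.1 == c) = false := by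
          by_cases hdc : d.1 = c
          · rw [hdc] at hS; exact absurd hS hc
          · simpa using hdc
        rw [hcf]
        simp [pdpOpt, pdpFirst?, hne]
    · have hS' : PySem.Set.contains S d.1 = false := by
        cases h2 : PySem.Set.contains S d.1
        · rfl
        · exact absurd h2 hS
      have hgetD : ∀ x, (((if cd.contains d.1 = false then cd.insert d.1 [] else cd).modify
          d.1 [] (fun l => l ++ [d.2.2])).getD x [])
            = if x = d.1 then cd.getD d.1 [] ++ [d.2.2] else cd.getD x [] := by
        intro x
        by_cases hc : cd.contains d.1 = false
        · rw [if_pos hc]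
          have h0 : cd.getD d.1 [] = [] := PySem.Dict.getD_of_not_contains _ _ hc
          by_cases hx : x = d.1 <;>
            simp [PySem.Dict.getD_modify, PySem.Dict.getD_insert, hx, h0]
        · rw [if_neg hc, PySem.Dict.getD_modify]
      rw [show pdpStepA (cd, S) d
          = ((if cd.contains d.1 = false then cd.insert d.1 [] else cd).modify
              d.1 [] (fun l => l ++ [d.2.2]), PySem.Set.add S d.1) from by
            simp only [pdpStepA, hS', Bool.false_eq_true, if_false],
        ih _ _, hgetD c]
      by_cases hdc : c = d.1
      · have hbeq : (d.1 == c) = true := by rw [hdc]; exact beq_self_eq_true _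
        have hin : PySem.Set.contains (PySem.Set.add S d.1) c = true := by
          rw [hdc]
          exact (PySem.Set.contains_iff _ _).2 ((PySem.Set.mem_add _ _ _).2 (Or.inr rfl))
        have hSc : PySem.Set.contains S c = false := by rw [hdc]; exact hS'
        rw [if_pos hdc, hin, hSc]
        simp [pdpOpt, pdpFirst?, hdc]
      · have hadd : PySem.Set.contains (PySem.Set.add S d.1) c = PySem.Set.contains S c := by
          by_cases hcS : PySem.Set.contains S c = true
          · rw [hcS]
            exact (PySem.Set.contains_iff _ _).2
              ((PySem.Set.mem_add _ _ _).2 (Or.inl ((PySem.Set.contains_iff _ _).1 hcS)))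
          · have hcSf : PySem.Set.contains S c = false := by
              cases h2 : PySem.Set.contains S c
              · rfl
              · exact absurd h2 hcS
            rw [hcSf]
            cases h2 : PySem.Set.contains (PySem.Set.add S d.1) c
            · rfl
            · rcases (PySem.Set.mem_add _ _ _).1 ((PySem.Set.contains_iff _ _).1 h2) with hx | hx
              · rw [(PySem.Set.contains_iff _ _).2 hx] at hcSf; cases hcSf
              · exact absurd hx hdc
        have hne : (d.1 == c) = false := by
          by_cases h2 : d.1 = c
          · exact absurd h2.symm hdc
          · simpa using h2
        rw [if_neg hdc, hadd]
        by_cases hcS : PySem.Set.contains S c = true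
        · rw [hcS]; simp
        · have hcSf : PySem.Set.contains S c = false := by
            cases h2 : PySem.Set.contains S c
            · rfl
            · exact absurd h2 hcS
          rw [hcSf]
          simp [pdpOpt, pdpFirst?, hne]

-- B's pass-2 step list, one env appended
lemma pdp_steps_append (ds : List (Int × List (String × Int × Int)))
    (e : Int × List (String × Int × Int)) (c : String) :
    pdpSteps (ds ++ [e]) c = pdpSteps ds c ++ pdpOpt c e.2 := by
  unfold pdpSteps
  rw [List.foldl_append, List.foldl_cons, List.foldl_nil]
  cases h : pdpFirst? c e.2 <;> simp [pdpOpt, h]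

-- the master invariant of A's outer fold: keys are B's order, values are B's step lists
lemma pdp_main (ds : List (Int × List (String × Int × Int))) :
    (pdpAfold ds).keys = pdpOrder ds ∧ (pdpAfold ds).keys.Nodup ∧
      ∀ c, (pdpAfold ds).getD c [] = pdpSteps ds c := by
  induction ds using List.reverseRecOn with
  | nil =>
    refine ⟨rfl, List.nodup_nil, fun c => ?_⟩
    simp [pdpAfold, pdpSteps, PySem.Dict.getD_empty]
  | append_singleton t e ih =>
    obtain ⟨hk, hnd, hget⟩ := ih
    have hfold : pdpAfold (t ++ [e]) = ((e.2.foldl pdpStepA (pdpAfold t, PySem.Set.empty)).1) := by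
      unfold pdpAfold
      rw [List.foldl_append, List.foldl_cons, List.foldl_nil]
    have hSempty : ∀ c : String, PySem.Set.contains PySem.Set.empty c = false := by
      intro c; rfl
    refine ⟨?_, ?_, ?_⟩
    · rw [hfold, pdp_env_keys _ _ _ (fun c hc => by rw [hSempty c] at hc; cases hc), hk,
        pdp_order_eq, pdp_order_eq, List.foldl_append, List.foldl_cons, List.foldl_nil]
    · rw [hfold]; exact pdp_env_nodup _ _ _ hnd
    · intro c
      rw [hfold, pdp_env_getD, hSempty c, if_neg (by simp), hget c, pdp_steps_append]

-- ===== VERDICT (by name: the statement is the Claim_ definition above) =====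
theorem process_detections_pomdp_spec : Claim_equal_process_detections_pomdp := by
  intro detections _
  unfold Spec_process_detections_pomdp
  obtain ⟨hk, hnd, hget⟩ := pdp_main detections
  have hA : process_detections_pomdp detections = (pdpAfold detections).items := rfl
  have hOrderNodup : (pdpOrder detections).Nodup := hk ▸ hnd
  have hB : process_detections_pomdp_alt detections
      = (pdpOrder detections).map (fun c => (c, pdpSteps detections c)) := by
    unfold process_detections_pomdp_alt
    rw [PySem.Dict.items_foldl_insert_fresh (pdpOrder detections) (fun c => c)
      (fun c => pdpSteps detections c) PySem.Dict.empty
      (fun a _ => PySem.Dict.contains_empty a) (by simpa using hOrderNodup)]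
    rfl
  rw [hA, hB, PySem.Dict.items_eq_map_keys _ hnd [], hk]
  exact List.map_congr_left (fun c _ => by rw [hget c])
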